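-- pv_equiv track=rewrite | github.com/golevss/MIREATOM | lexer.py | find_parts
-- ===== SOURCE A (Python) =====
-- def find_parts(str1, str2):
--     common_substrings = []
--     # Нахождение всех схожих подстрок
--     for i in range(len(str1)):
--         for j in range(i + 1, len(str1) + 1):
--             if str1[i:j] in str2:
--                 common_substrings.append(str1[i:j])
--     all_templates = sorted(list(set(common_substrings)))
--
--     templates = []
--     max_len = -1
--     # Сортировка подстрок по длинне
--     for i in range (len(all_templates)):
--         if (len(all_templates[i]) > max_len):
--             max_len = len(all_templates[i])
--         elif (len(all_templates[i]) <= max_len):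
--             templates.append(all_templates[i - 1])
--             max_len = len(all_templates[i])
--     if len(all_templates) != 0:
--         templates.append(all_templates[-1])
--
--     key_words = ['#','@']
--     templates = sorted(templates,key = len, reverse = True)
--     rm_temp = []
--     # Нахождение неуникальных строк
--     for el1 in templates:
--         for el2 in templates:
--             if (el1 != el2 and el2 in el1) or all(word not in el2 for word in key_words):
--                 rm_temp.append(el2)
--     # Удаление неуникальных строк
--     for el1 in rm_temp:
--         for el2 in templates:
--             if el2 == el1:
--                 templates.remove(el2)
--
--     return templates
-- ===== SOURCE B (Python) =====
-- def find_parts(str1, str2):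
--     n = len(str1)
--     subs = set()
--     # per start index, extend the match while it still occurs in str2
--     # (containment of str1[i:j] in str2 is prefix-monotone in j)
--     for i in range(n):
--         l = 0
--         while l < n - i and str1[i:i + l + 1] in str2:
--             l += 1
--             subs.add(str1[i:i + l])
--     a = sorted(subs)
--     # keep each element whose successor (in lexicographic order) is not longer,
--     # plus the last element
--     templates = [x for x, y in zip(a, a[1:]) if len(y) <= len(x)] + a[-1:]
--     templates.sort(key=len, reverse=True)
--     # keep exactly the templates that carry a key word and are not a proper
--     # substring of another template
--     return [t for t in templates
--             if ('#' in t or '@' in t)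
--             and not any(u != t and t in u for u in templates)]
-- ===== Notes on version B (the rewrite author's own statement) =====
-- stated objective: faster
-- what changed: B replaces A's try-every-(i,j) substring enumeration by a per-start-index extend-while-contained scan (containment in str2 is prefix-monotone in the end index), replaces A's stateful max_len loop by a zip-with-successor comprehension, and replaces A's rm_temp collection plus repeated list.remove passes by one direct filter keeping templates that contain '#' or '@' and are not substrings of another template.
import Mathlib
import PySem

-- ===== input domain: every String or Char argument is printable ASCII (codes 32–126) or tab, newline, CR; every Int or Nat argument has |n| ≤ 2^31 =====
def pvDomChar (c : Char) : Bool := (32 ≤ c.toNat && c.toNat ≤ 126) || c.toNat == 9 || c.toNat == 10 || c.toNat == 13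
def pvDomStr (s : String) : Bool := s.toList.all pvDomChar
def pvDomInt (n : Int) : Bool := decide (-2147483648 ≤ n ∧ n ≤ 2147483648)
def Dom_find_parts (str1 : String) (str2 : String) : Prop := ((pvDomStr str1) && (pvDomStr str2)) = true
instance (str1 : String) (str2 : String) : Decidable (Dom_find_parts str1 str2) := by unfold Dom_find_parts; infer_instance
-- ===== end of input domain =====

-- B replaces A's try-every-(i,j) substring enumeration by a per-start-index
-- extend-while-contained scan (containment is prefix-monotone), A's stateful
-- max_len loop by a zip-with-successor comprehension, and A's rm_temp /
-- repeated-remove machinery by one direct filter; objective: faster.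

-- ===== PORT A =====
-- the for-loop 'for el2 in templates: if el2 == el1: templates.remove(el2)'
-- (iteration over a list mutated in place): index k advances by one each step,
-- the list shrinks via list.remove (first occurrence)
def findPartsRemoveLoop (el1 : String) (k : Nat) (lst : List String) : List String :=
  if h : k < lst.length then
    let el2 := lst[k]
    if el2 == el1 then
      findPartsRemoveLoop el1 (k + 1) ((PySem.List.remove? lst el2).getD lst)
    else
      findPartsRemoveLoop el1 (k + 1) lst
  else lst
termination_by lst.length - k
decreasing_by
  · have : ((PySem.List.remove? lst lst[k]).getD lst).length ≤ lst.length := by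
      simp only [PySem.List.remove?]
      cases hfind : List.idxOf? lst[k] lst with
      | none => simp
      | some j =>
        simp only [Option.getD_some, Option.map_some]
        rw [List.length_eraseIdx]
        split <;> omega
    omega
  · omega

def find_parts (str1 : String) (str2 : String) : List String :=
  let common : List String :=
    (PySem.List.pyRange 0 (PySem.Str.len str1) 1).foldl (fun acc i =>
      (PySem.List.pyRange (i + 1) (PySem.Str.len str1 + 1) 1).foldl (fun acc j =>
        if PySem.Str.isIn (PySem.Str.slice str1 (some i) (some j)) str2 then
          acc ++ [PySem.Str.slice str1 (some i) (some j)]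
        else acc) acc) []
  let all_templates : List String :=
    PySem.List.sorted (PySem.Set.ofList common) (fun x => x)
  let st : List String × Int :=
    (PySem.List.pyRange 0 (all_templates.length : Int) 1).foldl (fun st i =>
      if PySem.Str.len (PySem.List.pyGetD all_templates i "") > st.2 then
        (st.1, PySem.Str.len (PySem.List.pyGetD all_templates i ""))
      else if PySem.Str.len (PySem.List.pyGetD all_templates i "") ≤ st.2 then
        (st.1 ++ [PySem.List.pyGetD all_templates (i - 1) ""],
         PySem.Str.len (PySem.List.pyGetD all_templates i ""))
      else st) ([], -1)
  let templates0 : List String :=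
    if all_templates.length ≠ 0 then st.1 ++ [PySem.List.pyGetD all_templates (-1) ""]
    else st.1
  let templates1 : List String :=
    PySem.List.sorted templates0 (fun s => PySem.Str.len s) true
  let key_words : List String := ["#", "@"]
  let rm_temp : List String :=
    templates1.foldl (fun acc el1 =>
      templates1.foldl (fun acc el2 =>
        if (el1 ≠ el2 ∧ PySem.Str.isIn el2 el1) ∨
            (key_words.all fun w => !PySem.Str.isIn w el2) then
          acc ++ [el2]
        else acc) acc) []
  rm_temp.foldl (fun t el1 => findPartsRemoveLoop el1 0 t) templates1

-- ===== PORT B =====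
-- the while loop 'while l < n - i and str1[i:i+l+1] in str2: l += 1; subs.add(str1[i:i+l])'
def findPartsAltWhile (str1 str2 : String) (i l : Nat) (s : PySem.Set String) : PySem.Set String :=
  if h : l < str1.toList.length - i ∧
      PySem.Str.isIn (PySem.Str.slice str1 (some (i : Int)) (some ((i : Int) + (l : Int) + 1))) str2 then
    findPartsAltWhile str1 str2 i (l + 1)
      (PySem.Set.add s (PySem.Str.slice str1 (some (i : Int)) (some ((i : Int) + (l : Int) + 1))))
  else s
termination_by str1.toList.length - i - l
decreasing_by omega

def find_parts_alt (str1 : String) (str2 : String) : List String :=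
  let n := str1.toList.length
  let subs : PySem.Set String :=
    (List.range n).foldl (fun s i => findPartsAltWhile str1 str2 i 0 s) PySem.Set.empty
  let a : List String := PySem.List.sorted subs (fun x => x)
  let templates0 : List String :=
    ((a.zip (PySem.List.slice a (some 1) none)).filter
        (fun p => PySem.Str.len p.2 ≤ PySem.Str.len p.1)).map (fun p => p.1)
      ++ PySem.List.slice a (some (-1)) none
  let templates : List String :=
    PySem.List.sorted templates0 (fun s => PySem.Str.len s) true
  templates.filter (fun t =>
    (PySem.Str.isIn "#" t || PySem.Str.isIn "@" t) &&
    !(templates.any (fun u => u ≠ t && PySem.Str.isIn t u)))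

-- ===== PRECONDITION & SPEC =====
def Spec_find_parts (str1 : String) (str2 : String) (out : List String) : Prop := out = find_parts_alt str1 str2
instance (str1 : String) (str2 : String) (out : List String) : Decidable (Spec_find_parts str1 str2 out) := by unfold Spec_find_parts; infer_instance

-- ===== CLAIM (what is proved, stated in full; the proofs are below) =====
def Claim_equal_find_parts : Prop := ∀ (str1 : String) (str2 : String), Dom_find_parts str1 str2 → Spec_find_parts str1 str2 (find_parts str1 str2)

-- ===== LEMMAS AND PROOFS =====

def strSl (str1 : String) (i m : Nat) : String :=
  PySem.Str.slice str1 (some (i : Int)) (some ((i : Int) + (m : Int)))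

theorem toList_strSl (s : String) (i m : Nat) :
    (strSl s i m).toList = (s.toList.drop i).take m := by
  simp [strSl, PySem.Str.toList_slice, PySem.List.slice_natCast_add]

theorem strSl_mono_isIn (s t : String) (i : Nat) {m m' : Nat} (hmm : m ≤ m')
    (h : PySem.Str.isIn (strSl s i m') t = true) : PySem.Str.isIn (strSl s i m) t = true := by
  rw [PySem.Str.isIn_iff_infix] at h ⊢
  refine List.IsInfix.trans (List.IsPrefix.isInfix ?_) h
  rw [toList_strSl, toList_strSl]
  have h1 : (List.take m' (s.toList.drop i)).take m = List.take m (s.toList.drop i) := by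
    rw [List.take_take]; rw [Nat.min_eq_left hmm]
  rw [← h1]; exact List.take_prefix _ _

theorem mem_altWhile (str1 str2 : String) : ∀ (i l : Nat) (s : PySem.Set String) (x : String),
    x ∈ findPartsAltWhile str1 str2 i l s ↔
      x ∈ s ∨ ∃ m : Nat, l < m ∧ i + m ≤ str1.toList.length ∧
        PySem.Str.isIn (strSl str1 i m) str2 = true ∧ x = strSl str1 i m := by
  intro i l s x
  induction hfu : str1.toList.length - i - l generalizing l s with
  | zero =>
    rw [findPartsAltWhile]
    rw [dif_neg (by omega)]
    constructor
    · exact Or.inl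
    · rintro (hx | ⟨m, hm1, hm2, _, _⟩)
      · exact hx
      · omega
  | succ f IH =>
    rw [findPartsAltWhile]
    by_cases hc : l < str1.toList.length - i ∧
        PySem.Str.isIn (PySem.Str.slice str1 (some (i : Int)) (some ((i : Int) + (l : Int) + 1))) str2 = true
    · rw [dif_pos hc]
      have hsl : PySem.Str.slice str1 (some (i : Int)) (some ((i : Int) + (l : Int) + 1)) = strSl str1 i (l + 1) := by
        unfold strSl; push_cast; ring_nf
      rw [IH (l+1) _ (by omega)]
      rw [hsl] at hc ⊢
      rw [PySem.Set.mem_add]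
      constructor
      · rintro (⟨hx | hx⟩ | ⟨m, h1, h2, h3, h4⟩)
        · exact Or.inl hx
        · exact Or.inr ⟨l+1, by omega, by omega, hc.2, hx⟩
        · exact Or.inr ⟨m, by omega, h2, h3, h4⟩
      · rintro (hx | ⟨m, h1, h2, h3, h4⟩)
        · exact Or.inl (Or.inl hx)
        · by_cases hm : m = l + 1
          · subst hm; exact Or.inl (Or.inr h4)
          · exact Or.inr ⟨m, by omega, h2, h3, h4⟩
    · rw [dif_neg hc]
      constructor
      · exact Or.inl
      · rintro (hx | ⟨m, h1, h2, h3, h4⟩)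
        · exact hx
        · exfalso
          apply hc
          have hsl : PySem.Str.slice str1 (some (i : Int)) (some ((i : Int) + (l : Int) + 1)) = strSl str1 i (l + 1) := by
            unfold strSl; push_cast; ring_nf
          rw [hsl]
          exact ⟨by omega, strSl_mono_isIn _ _ _ (by omega) h3⟩

theorem nodup_altWhile (str1 str2 : String) : ∀ (i l : Nat) (s : PySem.Set String),
    s.Nodup → (findPartsAltWhile str1 str2 i l s).Nodup := by
  intro i l s hs
  induction hfu : str1.toList.length - i - l generalizing l s with
  | zero => rw [findPartsAltWhile, dif_neg (by omega)]; exact hs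
  | succ f IH =>
    rw [findPartsAltWhile]
    split
    · exact IH _ _ (PySem.Set.nodup_add _ _ hs) (by omega)
    · exact hs

theorem mem_common (str1 str2 : String) (x : String) :
    x ∈ (PySem.List.pyRange 0 (PySem.Str.len str1) 1).foldl (fun acc i =>
      (PySem.List.pyRange (i + 1) (PySem.Str.len str1 + 1) 1).foldl (fun acc j =>
        if PySem.Str.isIn (PySem.Str.slice str1 (some i) (some j)) str2 then
          acc ++ [PySem.Str.slice str1 (some i) (some j)]
        else acc) acc) [] ↔
    ∃ i m : Nat, 1 ≤ m ∧ i + m ≤ str1.toList.length ∧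
      PySem.Str.isIn (strSl str1 i m) str2 = true ∧ x = strSl str1 i m := by
  have hstep : ∀ (acc : List String) (i : Int),
      (PySem.List.pyRange (i + 1) (PySem.Str.len str1 + 1) 1).foldl (fun acc j =>
        if PySem.Str.isIn (PySem.Str.slice str1 (some i) (some j)) str2 then
          acc ++ [PySem.Str.slice str1 (some i) (some j)]
        else acc) acc
      = acc ++ ((PySem.List.pyRange (i + 1) (PySem.Str.len str1 + 1) 1).filter
          (fun j => PySem.Str.isIn (PySem.Str.slice str1 (some i) (some j)) str2)).map
          (fun j => PySem.Str.slice str1 (some i) (some j)) := by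
    intro acc i
    exact PySem.List.foldl_append_if _ _ _ _
  simp only [hstep]
  rw [PySem.List.foldl_append_eq_flatMap]
  simp only [List.nil_append, List.mem_flatMap, List.mem_map, List.mem_filter,
    PySem.List.mem_pyRange_iff_of_pos (by norm_num : (0:Int) < 1), PySem.Str.len_eq]
  constructor
  · rintro ⟨i, ⟨hi0, hin, -⟩, j, ⟨⟨hj1, hjn, -⟩, hIn⟩, hx⟩
    refine ⟨i.toNat, (j - i).toNat, by omega, by omega, ?_, ?_⟩
    all_goals
      have e1 : ((i.toNat : Nat) : Int) = i := by omega
      have e2 : ((i.toNat : Int) + (((j - i).toNat : Nat) : Int)) = j := by omega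
      have hsl : PySem.Str.slice str1 (some i) (some j) = strSl str1 i.toNat (j - i).toNat := by
        unfold strSl; rw [e2, e1]
      rw [← hsl]
    · exact hIn
    · exact hx.symm
  · rintro ⟨i, m, hm1, hmn, hIn, hx⟩
    refine ⟨(i : Int), ⟨by omega, by omega, by simp⟩, (i : Int) + (m : Int),
      ⟨⟨by omega, by omega, by simp⟩, ?_⟩, ?_⟩
    · exact hIn
    · exact hx.symm

def fpLoop : String → List String → List String → List String
  | _, [], acc => acc
  | prev, y :: ys, acc =>
      fpLoop y ys (if PySem.Str.len y ≤ PySem.Str.len prev then acc ++ [prev] else acc)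

theorem fpLoop_eq (ys : List String) : ∀ (prev : String) (acc : List String),
    fpLoop prev ys acc = acc ++
      (((prev :: ys).zip ys).filter
        (fun p => decide (PySem.Str.len p.2 ≤ PySem.Str.len p.1))).map (fun p => p.1) := by
  induction ys with
  | nil => intro prev acc; simp [fpLoop]
  | cons y ys IH =>
    intro prev acc
    simp only [fpLoop, IH y]
    simp only [List.zip_cons_cons, List.filter_cons]
    by_cases h : y.length ≤ prev.length
    · simp [PySem.Str.len_eq, h]
    · simp [PySem.Str.len_eq, h]

theorem fpIndexLoop (a : List String) : ∀ (fuel k : Nat) (acc : List String),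
    a.length - k = fuel → 1 ≤ k → k ≤ a.length →
    (PySem.List.pyRange (k : Int) (a.length : Int) 1).foldl (fun st i =>
      if PySem.Str.len (PySem.List.pyGetD a i "") > st.2 then
        (st.1, PySem.Str.len (PySem.List.pyGetD a i ""))
      else if PySem.Str.len (PySem.List.pyGetD a i "") ≤ st.2 then
        (st.1 ++ [PySem.List.pyGetD a (i - 1) ""],
         PySem.Str.len (PySem.List.pyGetD a i ""))
      else st) (acc, PySem.Str.len (a.getD (k - 1) ""))
    = (fpLoop (a.getD (k - 1) "") (a.drop k) acc, PySem.Str.len (a.getD (a.length - 1) "")) := by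
  intro fuel
  induction fuel with
  | zero =>
    intro k acc hf h1 h2
    have hk : k = a.length := by omega
    have hnil : PySem.List.pyRange (k : Int) (a.length : Int) 1 = [] := by
      rw [List.eq_nil_iff_forall_not_mem]
      intro x hx
      rw [PySem.List.mem_pyRange_iff_of_pos (by norm_num)] at hx
      omega
    rw [hnil]
    simp only [List.foldl_nil]
    rw [hk]
    simp [fpLoop, List.drop_length]
  | succ f IH =>
    intro k acc hf h1 h2
    have hk : k < a.length := by omega
    rw [PySem.List.pyRange_one_cons (by exact_mod_cast hk)]
    rw [List.foldl_cons]
    have e1 : PySem.List.pyGetD a (k : Int) "" = a.getD k "" := PySem.List.pyGetD_natCast a k ""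
    have e2 : PySem.List.pyGetD a ((k : Int) - 1) "" = a.getD (k - 1) "" := by
      have : ((k : Int) - 1) = ((k - 1 : Nat) : Int) := by omega
      rw [this, PySem.List.pyGetD_natCast]
    have hdrop : a.drop k = a.getD k "" :: a.drop (k + 1) := by
      rw [List.drop_eq_getElem_cons hk, List.getD_eq_getElem a "" hk]
    by_cases hgt : PySem.Str.len (a.getD k "") > PySem.Str.len (a.getD (k - 1) "")
    · rw [if_pos (by rw [e1]; exact hgt)]
      dsimp only
      rw [e1]
      have := IH (k + 1) acc (by omega) (by omega) (by omega)
      simp only [Nat.add_sub_cancel] at this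
      push_cast at this
      rw [this, hdrop]
      simp only [fpLoop]
      rw [if_neg (by omega)]
    · rw [if_neg (by rw [e1]; exact hgt), if_pos (by rw [e1]; omega)]
      dsimp only
      rw [e1, e2]
      have := IH (k + 1) (acc ++ [a.getD (k - 1) ""]) (by omega) (by omega) (by omega)
      simp only [Nat.add_sub_cancel] at this
      push_cast at this
      rw [this, hdrop]
      simp only [fpLoop]
      rw [if_pos (by omega)]

theorem templates0_eq (a : List String) :
    (if a.length ≠ 0 then
      ((PySem.List.pyRange 0 (a.length : Int) 1).foldl (fun st i =>
        if PySem.Str.len (PySem.List.pyGetD a i "") > st.2 then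
          (st.1, PySem.Str.len (PySem.List.pyGetD a i ""))
        else if PySem.Str.len (PySem.List.pyGetD a i "") ≤ st.2 then
          (st.1 ++ [PySem.List.pyGetD a (i - 1) ""],
           PySem.Str.len (PySem.List.pyGetD a i ""))
        else st) ([], -1)).1 ++ [PySem.List.pyGetD a (-1) ""]
    else
      ((PySem.List.pyRange 0 (a.length : Int) 1).foldl (fun st i =>
        if PySem.Str.len (PySem.List.pyGetD a i "") > st.2 then
          (st.1, PySem.Str.len (PySem.List.pyGetD a i ""))
        else if PySem.Str.len (PySem.List.pyGetD a i "") ≤ st.2 then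
          (st.1 ++ [PySem.List.pyGetD a (i - 1) ""],
           PySem.Str.len (PySem.List.pyGetD a i ""))
        else st) ([], -1)).1)
    = ((a.zip (PySem.List.slice a (some 1) none)).filter
        (fun p => PySem.Str.len p.2 ≤ PySem.Str.len p.1)).map (fun p => p.1)
      ++ PySem.List.slice a (some (-1)) none := by
  rcases a with - | ⟨x, t⟩
  · simp [PySem.List.slice]
  · set a := x :: t with ha
    have hne : a ≠ [] := by simp [ha]
    have hlen : a.length ≠ 0 := by simp [ha]
    rw [if_pos hlen]
    have h0 : PySem.List.pyRange 0 (a.length : Int) 1 = 0 :: PySem.List.pyRange 1 (a.length : Int) 1 := by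
      have := PySem.List.pyRange_one_cons (a := 0) (b := (a.length : Int)) (by simp [ha])
      simpa using this
    rw [h0, List.foldl_cons]
    rw [if_pos (by
      rw [show ((0:Int) = ((0:Nat):Int)) from rfl, PySem.List.pyGetD_natCast]
      rw [PySem.Str.len_eq]
      omega)]
    dsimp only
    rw [show ((0:Int) = ((0:Nat):Int)) from rfl, PySem.List.pyGetD_natCast]
    have hfold := fpIndexLoop a (a.length - 1) 1 [] (by rfl) (by omega) (by simp [ha])
    simp only [Nat.cast_one, Nat.sub_self, List.drop_one] at hfold
    rw [hfold]
    rw [fpLoop_eq, List.nil_append]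
    rw [PySem.List.slice_from_one, PySem.List.slice_from_neg_one]
    have hhead : a.getD 0 "" :: a.tail = a := by simp [ha]
    rw [hhead]
    rw [List.drop_length_sub_one hne]
    rw [PySem.List.pyGetD_neg_ofNat a 1 "" (by omega) (by simp [ha])]
    rw [List.getLast_eq_getElem]
theorem remove?_of_mem (l : List String) (v : String) (h : v ∈ l) :
    PySem.List.remove? l v = some (l.erase v) := by
  simp only [PySem.List.remove?]
  rw [List.erase_eq_eraseIdx]
  cases hfind : List.idxOf? v l with
  | none =>
    rw [List.idxOf?_eq_none_iff] at hfind
    exact absurd h hfind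
  | some j => simp

theorem removeLoop_no_match (el1 : String) : ∀ (fuel k : Nat) (lst : List String),
    lst.length - k = fuel → el1 ∉ lst.drop k → findPartsRemoveLoop el1 k lst = lst := by
  intro fuel
  induction fuel with
  | zero =>
    intro k lst hf hnm
    rw [findPartsRemoveLoop, dif_neg (by omega)]
  | succ f IH =>
    intro k lst hf hnm
    have hk : k < lst.length := by omega
    rw [findPartsRemoveLoop, dif_pos hk]
    have hmem : lst[k] ∈ lst.drop k := by
      rw [List.drop_eq_getElem_cons hk]; exact List.mem_cons_self
    rw [if_neg (by
      intro hbe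
      exact hnm (by rwa [(beq_iff_eq).1 hbe] at hmem))]
    apply IH (k + 1) lst (by omega)
    intro hmm
    apply hnm
    apply List.mem_of_mem_drop (i := 1)
    rw [List.drop_drop]
    simpa [Nat.add_comm] using hmm

theorem removeLoop_eq (el1 : String) (lst : List String) (hnd : lst.Nodup) :
    ∀ (fuel k : Nat), lst.length - k = fuel →
    findPartsRemoveLoop el1 k lst = lst.take k ++ (lst.drop k).erase el1 := by
  intro fuel
  induction fuel with
  | zero =>
    intro k hf
    rw [findPartsRemoveLoop, dif_neg (by omega)]
    rw [List.take_of_length_le (by omega), List.drop_of_length_le (by omega)]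
    simp
  | succ f IH =>
    intro k hf
    have hk : k < lst.length := by omega
    rw [findPartsRemoveLoop, dif_pos hk]
    have hdropk : lst.drop k = lst[k] :: lst.drop (k + 1) := List.drop_eq_getElem_cons hk
    have hmemdrop : lst[k] ∈ lst.drop k := by rw [hdropk]; exact List.mem_cons_self
    by_cases hbe : lst[k] == el1
    · rw [if_pos hbe]
      have heq : el1 = lst[k] := ((beq_iff_eq).1 hbe).symm
      rw [remove?_of_mem lst lst[k] (List.getElem_mem hk), Option.getD_some, ← heq]
      have hnotin : el1 ∉ lst.erase el1 := hnd.not_mem_erase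
      rw [removeLoop_no_match el1 ((lst.erase el1).length - (k + 1)) (k + 1) _ rfl
          (fun hmm => hnotin (List.mem_of_mem_drop hmm))]
      have htk : el1 ∉ lst.take k := by
        intro hmem
        rw [← List.take_append_drop k lst] at hnd
        exact ((List.nodup_append.1 hnd).2.2 el1 hmem el1 (by rw [heq]; exact hmemdrop)) rfl
      conv_lhs => rw [← List.take_append_drop k lst]
      exact List.erase_append_right _ htk
    · rw [if_neg hbe]
      rw [IH (k + 1) (by omega)]
      rw [hdropk, List.erase_cons_tail (by simpa using fun h => hbe (by simp [h]))]
      rw [List.take_add_one, List.getElem?_eq_getElem hk]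
      rw [Option.toList_some, List.append_assoc, List.singleton_append]

theorem removeFold_eq (rm : List String) : ∀ (l : List String), l.Nodup →
    rm.foldl (fun t el1 => findPartsRemoveLoop el1 0 t) l
      = l.filter (fun x => decide (x ∉ rm)) := by
  induction rm with
  | nil => intro l _; simp
  | cons e rs IH =>
    intro l hnd
    rw [List.foldl_cons]
    have h0 : findPartsRemoveLoop e 0 l = l.erase e := by
      rw [removeLoop_eq e l hnd (l.length - 0) 0 rfl]
      simp
    rw [h0, IH _ (hnd.erase e), hnd.erase_eq_filter, List.filter_filter]
    apply List.filter_congr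
    intro x _
    by_cases hx : x = e
    · subst hx; simp
    · by_cases hr : x ∈ rs <;> simp [hx, hr]

theorem mapfst_zip_tail : ∀ (a : List String), (a.zip a.tail).map (fun p => p.1) = a.dropLast := by
  intro a
  induction a with
  | nil => simp
  | cons x t IH =>
    cases t with
    | nil => simp
    | cons y t' =>
      simp only [List.tail_cons, List.zip_cons_cons, List.map_cons]
      have : ((y :: t').zip t').map (fun p => p.1) = (y :: t').dropLast := by
        simpa using IH
      rw [this]
      simp

theorem templates0_nodup (a : List String) (h : a.Nodup) :
    (((a.zip (PySem.List.slice a (some 1) none)).filter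
        (fun p => PySem.Str.len p.2 ≤ PySem.Str.len p.1)).map (fun p => p.1)
      ++ PySem.List.slice a (some (-1)) none).Nodup := by
  rcases eq_or_ne a [] with rfl | hne
  · simp [PySem.List.slice]
  · rw [PySem.List.slice_from_one, PySem.List.slice_from_neg_one, List.drop_length_sub_one hne]
    have hsub : (((a.zip a.tail).filter
        (fun p => PySem.Str.len p.2 ≤ PySem.Str.len p.1)).map (fun p => p.1)).Sublist a.dropLast := by
      rw [← mapfst_zip_tail a]
      exact List.Sublist.map _ List.filter_sublist
    have hdl : a.dropLast.Nodup := (List.dropLast_sublist a).nodup h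
    have hlast : a.getLast hne ∉ a.dropLast := by
      have h' := h
      rw [← List.dropLast_append_getLast hne] at h'
      intro hmem
      exact ((List.nodup_append.1 h').2.2 _ hmem _ List.mem_cons_self) rfl
    apply List.Nodup.append (hsub.nodup hdl) (by simp)
    intro x hx1 hx2
    rw [List.mem_singleton] at hx2
    exact hlast (hx2 ▸ hsub.subset hx1)

theorem rm_mem (T : List String) (x : String) :
    x ∈ T.foldl (fun acc el1 =>
      T.foldl (fun acc el2 =>
        if (el1 ≠ el2 ∧ PySem.Str.isIn el2 el1) ∨
            ((["#", "@"] : List String).all fun w => !PySem.Str.isIn w el2) then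
          acc ++ [el2]
        else acc) acc) [] ↔
    x ∈ T ∧ ∃ el1 ∈ T, ((el1 ≠ x ∧ PySem.Str.isIn x el1) ∨
      ((["#", "@"] : List String).all fun w => !PySem.Str.isIn w x)) := by
  have hstep : ∀ (acc : List String) (el1 : String),
      T.foldl (fun acc el2 =>
        if (el1 ≠ el2 ∧ PySem.Str.isIn el2 el1) ∨
            ((["#", "@"] : List String).all fun w => !PySem.Str.isIn w el2) then
          acc ++ [el2]
        else acc) acc
      = acc ++ T.filter (fun el2 => decide ((el1 ≠ el2 ∧ PySem.Str.isIn el2 el1) ∨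
          ((["#", "@"] : List String).all fun w => !PySem.Str.isIn w el2))) := by
    intro acc el1
    exact PySem.List.foldl_append_ite_eq_filter _ _ _
  simp only [hstep]
  rw [PySem.List.foldl_append_eq_flatMap]
  simp only [List.nil_append, List.mem_flatMap, List.mem_filter, decide_eq_true_eq]
  constructor
  · rintro ⟨el1, h1, h2, h3⟩
    exact ⟨h2, el1, h1, h3⟩
  · rintro ⟨hx, el1, h1, h3⟩
    exact ⟨el1, h1, hx, h3⟩

-- final keep-filter congruence, t ∈ T
theorem keep_congr (T : List String) (t : String) (ht : t ∈ T)
    (hrm : ∀ x, x ∈ (T.foldl (fun acc el1 =>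
      T.foldl (fun acc el2 =>
        if (el1 ≠ el2 ∧ PySem.Str.isIn el2 el1) ∨
            ((["#", "@"] : List String).all fun w => !PySem.Str.isIn w el2) then
          acc ++ [el2]
        else acc) acc) []) ↔
      x ∈ T ∧ ∃ el1 ∈ T, ((el1 ≠ x ∧ PySem.Str.isIn x el1) ∨
        ((["#", "@"] : List String).all fun w => !PySem.Str.isIn w x))) :
    decide (t ∉ (T.foldl (fun acc el1 =>
      T.foldl (fun acc el2 =>
        if (el1 ≠ el2 ∧ PySem.Str.isIn el2 el1) ∨
            ((["#", "@"] : List String).all fun w => !PySem.Str.isIn w el2) then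
          acc ++ [el2]
        else acc) acc) []))
    = ((PySem.Str.isIn "#" t || PySem.Str.isIn "@" t) &&
        !(T.any (fun u => u ≠ t && PySem.Str.isIn t u))) := by
  rw [Bool.eq_iff_iff]
  rw [decide_eq_true_eq, hrm t]
  simp only [Bool.and_eq_true, Bool.or_eq_true, Bool.not_eq_true', List.any_eq_false,
    List.all_eq_true, Bool.not_eq_true, decide_eq_true_eq,
    not_and, not_or, not_exists, ne_eq, List.mem_cons, forall_eq_or_imp]
  constructor
  · intro h
    have h2 := h ht
    constructor
    · by_cases c1 : PySem.Str.isIn "#" t = true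
      · exact Or.inl c1
      · by_cases c2 : PySem.Str.isIn "@" t = true
        · exact Or.inr c2
        · exact absurd (by simp) ((h2 t ht).2 ((Bool.not_eq_true _) ▸ c1) ((Bool.not_eq_true _) ▸ c2))
    · intro x hx hne
      exact (h2 x hx).1 hne
  · rintro ⟨hkw, hsub⟩ _ x hx
    refine ⟨hsub x hx, fun hf hg => ?_⟩
    rcases hkw with hk | hk
    · exact absurd hk (by rw [hf]; exact Bool.false_ne_true)
    · exact absurd hk (by rw [hg]; exact Bool.false_ne_true)

theorem mem_range_foldl (str1 str2 : String) : ∀ (L : List Nat) (s : PySem.Set String) (x : String),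
    x ∈ L.foldl (fun s i => findPartsAltWhile str1 str2 i 0 s) s ↔
      x ∈ s ∨ ∃ i ∈ L, ∃ m : Nat, 0 < m ∧ i + m ≤ str1.toList.length ∧
        PySem.Str.isIn (strSl str1 i m) str2 = true ∧ x = strSl str1 i m := by
  intro L
  induction L with
  | nil => simp
  | cons i0 L IH =>
    intro s x
    rw [List.foldl_cons, IH, mem_altWhile]
    constructor
    · rintro ((hs | ⟨m, h1, h2, h3, h4⟩) | ⟨i, hi, m, h⟩)
      · exact Or.inl hs
      · exact Or.inr ⟨i0, List.mem_cons_self, m, h1, h2, h3, h4⟩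
      · exact Or.inr ⟨i, List.mem_cons_of_mem _ hi, m, h⟩
    · rintro (hs | ⟨i, hi, m, h⟩)
      · exact Or.inl (Or.inl hs)
      · rcases List.mem_cons.1 hi with rfl | hi'
        · exact Or.inl (Or.inr ⟨m, h⟩)
        · exact Or.inr ⟨i, hi', m, h⟩

theorem nodup_range_foldl (str1 str2 : String) : ∀ (L : List Nat) (s : PySem.Set String),
    s.Nodup → (L.foldl (fun s i => findPartsAltWhile str1 str2 i 0 s) s).Nodup := by
  intro L
  induction L with
  | nil => intro s hs; exact hs
  | cons i0 L IH =>
    intro s hs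
    exact IH _ (nodup_altWhile str1 str2 i0 0 s hs)

theorem a_eq (str1 str2 : String) :
    PySem.List.sorted (PySem.Set.ofList
      ((PySem.List.pyRange 0 (PySem.Str.len str1) 1).foldl (fun acc i =>
        (PySem.List.pyRange (i + 1) (PySem.Str.len str1 + 1) 1).foldl (fun acc j =>
          if PySem.Str.isIn (PySem.Str.slice str1 (some i) (some j)) str2 then
            acc ++ [PySem.Str.slice str1 (some i) (some j)]
          else acc) acc) [])) (fun x => x)
    = PySem.List.sorted
        ((List.range str1.toList.length).foldl
          (fun s i => findPartsAltWhile str1 str2 i 0 s) PySem.Set.empty) (fun x => x) := by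
  apply PySem.List.sorted_eq_sorted_of_perm _ _ _ (fun a b h => h)
  rw [List.perm_ext_iff_of_nodup (PySem.Set.nodup_ofList _)
    (nodup_range_foldl str1 str2 _ PySem.Set.empty List.nodup_nil)]
  intro x
  rw [PySem.Set.mem_ofList, mem_common, mem_range_foldl]
  simp only [List.mem_range, PySem.Set.empty, List.not_mem_nil, false_or]
  constructor
  · rintro ⟨i, m, hm, hn, hIn, hx⟩
    exact ⟨i, by omega, m, by omega, hn, hIn, hx⟩
  · rintro ⟨i, hi, m, hm, hn, hIn, hx⟩
    exact ⟨i, m, by omega, hn, hIn, hx⟩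

set_option maxHeartbeats 2000000 in
theorem find_parts_main (str1 str2 : String) : find_parts str1 str2 = find_parts_alt str1 str2 := by
  unfold find_parts find_parts_alt
  dsimp only
  rw [a_eq str1 str2]
  set a := PySem.List.sorted
      ((List.range str1.toList.length).foldl
        (fun s i => findPartsAltWhile str1 str2 i 0 s) PySem.Set.empty) (fun x => x) with ha
  have hndA : a.Nodup := by
    rw [ha]
    exact (PySem.List.sorted_perm _ _ _).symm.nodup
      (nodup_range_foldl str1 str2 _ PySem.Set.empty List.nodup_nil)
  rw [templates0_eq a]
  set T := PySem.List.sorted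
      (((a.zip (PySem.List.slice a (some 1) none)).filter
          (fun p => PySem.Str.len p.2 ≤ PySem.Str.len p.1)).map (fun p => p.1)
        ++ PySem.List.slice a (some (-1)) none) (fun s => PySem.Str.len s) true with hT
  have hndT : T.Nodup := by
    rw [hT]
    exact (PySem.List.sorted_perm _ _ _).symm.nodup (templates0_nodup a hndA)
  rw [removeFold_eq _ T hndT]
  apply List.filter_congr
  intro t ht
  exact keep_congr T t ht (fun x => rm_mem T x)

-- ===== VERDICT (by name: the statement is the Claim_ definition above) =====
theorem find_parts_spec : Claim_equal_find_parts := by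
  intro str1 str2 _
  unfold Spec_find_parts
  exact find_parts_main str1 str2
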